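-- pv_equiv track=rewrite | github.com/a-rebmann/semantic-annotation | model/augmented_log.py | find_role
-- ===== SOURCE A (Python) =====
-- def find_role(split, tags, role):
--     roles = []
--     curr = ''
--     for tok, r in zip(split, tags):
--         if r == role:
--             curr = " ".join([curr, tok])
--         if r != role and curr != '':
--             roles.append(curr.strip())
--             curr = ''
--     if curr != '':
--         roles.append(curr.strip())
--     return roles
-- ===== SOURCE B (Python) =====
-- def find_role(split, tags, role):
--     pairs = list(zip(split, tags))
--     n = len(pairs)
--     roles = []
--     i = 0
--     while i < n:
--         if pairs[i][1] != role:
--             i += 1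
--             continue
--         j = i
--         while j < n and pairs[j][1] == role:
--             j += 1
--         roles.append(" ".join(tok for tok, _ in pairs[i:j]).strip())
--         i = j
--     return roles
-- ===== Notes on version B (the rewrite author's own statement) =====
-- stated objective: simpler
-- what changed: Replaces A's incremental curr-accumulator/flush state machine with a run-at-a-time scan that finds each maximal role-tagged run with an inner index loop and joins its tokens once with ' '.join(...).strip().
import Mathlib
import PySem

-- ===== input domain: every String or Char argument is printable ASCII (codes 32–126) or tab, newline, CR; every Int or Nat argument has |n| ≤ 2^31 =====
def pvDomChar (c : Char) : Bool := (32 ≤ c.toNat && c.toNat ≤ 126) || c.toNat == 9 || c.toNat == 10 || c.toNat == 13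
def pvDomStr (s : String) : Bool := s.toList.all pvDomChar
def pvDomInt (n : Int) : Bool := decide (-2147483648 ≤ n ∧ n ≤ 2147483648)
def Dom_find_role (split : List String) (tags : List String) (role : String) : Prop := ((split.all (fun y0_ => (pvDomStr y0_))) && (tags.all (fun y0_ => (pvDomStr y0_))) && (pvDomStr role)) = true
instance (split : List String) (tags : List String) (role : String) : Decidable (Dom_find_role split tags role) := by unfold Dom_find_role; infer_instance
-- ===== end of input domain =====

-- B replaces A's incremental curr-accumulator/flush state machine by a run-at-a-time scan
-- that joins each maximal role-tagged run once (objective: simpler, one join per group).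

-- ===== PORT A =====
-- loop body of A's for-loop (both ifs, in order), as a named helper
def find_role_step (role : String) (st : List String × String) (p : String × String) : List String × String :=
  let curr := if p.2 == role then PySem.Str.join " " [st.2, p.1] else st.2
  if p.2 != role && curr != "" then (st.1 ++ [PySem.Str.strip curr], "") else (st.1, curr)

def find_role (split : List String) (tags : List String) (role : String) : List String :=
  let st := (split.zip tags).foldl (find_role_step role) ([], "")
  if st.2 != "" then st.1 ++ [PySem.Str.strip st.2] else st.1

-- ===== PORT B =====
-- B's inner 'while j' run scan is the takeWhile/dropWhile split of the remaining pairs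
def find_role_alt_go (role : String) : List (String × String) → List String
  | [] => []
  | (tok, r) :: rest =>
    if r == role then
      PySem.Str.strip (PySem.Str.join " " (tok :: (rest.takeWhile (fun q => q.2 == role)).map Prod.fst))
        :: find_role_alt_go role (rest.dropWhile (fun q => q.2 == role))
    else
      find_role_alt_go role rest
termination_by l => l.length
decreasing_by
  · exact Nat.lt_succ_of_le (List.length_dropWhile_le _ _)
  · simp

def find_role_alt (split : List String) (tags : List String) (role : String) : List String :=
  find_role_alt_go role (split.zip tags)

-- ===== PRECONDITION & SPEC =====
def Spec_find_role (split : List String) (tags : List String) (role : String) (out : List String) : Prop := out = find_role_alt split tags role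
instance (split : List String) (tags : List String) (role : String) (out : List String) : Decidable (Spec_find_role split tags role out) := by unfold Spec_find_role; infer_instance

-- ===== CLAIM (what is proved, stated in full; the proofs are below) =====
def Claim_equal_find_role : Prop := ∀ (split : List String) (tags : List String) (role : String), Dom_find_role split tags role → Spec_find_role split tags role (find_role split tags role)

-- ===== LEMMAS AND PROOFS =====

-- A's loop, rewritten as structural recursion on the remaining pairs (same state transitions)
def goA (role : String) : List (String × String) → String → List String
  | [], curr => if curr != "" then [PySem.Str.strip curr] else []
  | p :: rest, curr =>
    let c2 := if p.2 == role then PySem.Str.join " " [curr, p.1] else curr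
    if p.2 != role && c2 != "" then PySem.Str.strip c2 :: goA role rest "" else goA role rest c2

-- general char-level fact: appending one more piece to a nonempty join
theorem chars_join_snoc (sep y : List Char) :
    ∀ (xs : List (List Char)), xs ≠ [] →
      PySem.Chars.join sep (xs ++ [y]) = PySem.Chars.join sep xs ++ sep ++ y := by
  intro xs
  induction xs with
  | nil => intro h; exact absurd rfl h
  | cons x xs ih =>
    intro _
    cases xs with
    | nil => simp [PySem.Chars.join_cons_cons, PySem.Chars.join_singleton]
    | cons x2 rest =>
      have ihe := ih (by simp)
      rw [List.cons_append] at ihe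
      rw [List.cons_append, List.cons_append, PySem.Chars.join_cons_cons, ihe,
        PySem.Chars.join_cons_cons]
      simp [List.append_assoc]

-- A's " ".join([curr, tok]) step, expressed on the token list it represents
theorem join_snoc (t tok : String) (ts : List String) :
    PySem.Str.join " " [PySem.Str.join " " ("" :: t :: ts), tok]
      = PySem.Str.join " " ("" :: t :: (ts ++ [tok])) := by
  apply String.ext
  simp only [PySem.Str.toList_join, List.map]
  rw [PySem.Chars.join_cons_cons, PySem.Chars.join_singleton]
  have h := chars_join_snoc " ".toList tok.toList
      (List.map String.toList ("" :: t :: ts)) (by simp)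
  simp only [List.map] at h
  rw [← h]
  simp

theorem join_cons_toList (t : String) (ts : List String) :
    (PySem.Str.join " " ("" :: t :: ts)).toList
      = ' ' :: (PySem.Str.join " " (t :: ts)).toList := by
  simp [PySem.Str.toList_join, PySem.Chars.join_cons_cons]

theorem join_cons_ne_empty (t : String) (ts : List String) :
    PySem.Str.join " " ("" :: t :: ts) ≠ "" := by
  intro h
  have := congrArg String.toList h
  rw [join_cons_toList] at this
  simp at this

theorem strip_join_cons (t : String) (ts : List String) :
    PySem.Str.strip (PySem.Str.join " " ("" :: t :: ts))
      = PySem.Str.strip (PySem.Str.join " " (t :: ts)) := by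
  apply String.ext
  simp only [PySem.Str.toList_strip, join_cons_toList]
  simp [PySem.Chars.strip, PySem.Chars.lstrip, PySem.Chars.isspace]

-- the heart: A's state machine computes B's run-at-a-time groups
theorem goA_eq (role : String) :
    ∀ (n : Nat) (l : List (String × String)), l.length ≤ n →
      (goA role l "" = find_role_alt_go role l) ∧
      (∀ (t : String) (ts : List String),
        goA role l (PySem.Str.join " " ("" :: t :: ts))
          = PySem.Str.strip (PySem.Str.join " "
              (t :: (ts ++ (l.takeWhile (fun q => q.2 == role)).map Prod.fst)))
            :: find_role_alt_go role (l.dropWhile (fun q => q.2 == role))) := by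
  intro n
  induction n with
  | zero =>
    intro l hl
    have : l = [] := List.eq_nil_of_length_eq_zero (Nat.le_zero.mp hl)
    subst this
    constructor
    · simp [goA, find_role_alt_go]
    · intro t ts
      simp [goA, find_role_alt_go, join_cons_ne_empty t ts, strip_join_cons]
  | succ n ih =>
    intro l hl
    cases l with
    | nil =>
      constructor
      · simp [goA, find_role_alt_go]
      · intro t ts
        simp [goA, find_role_alt_go, join_cons_ne_empty t ts, strip_join_cons]
    | cons p rest =>
      have hrest : rest.length ≤ n := by simpa using Nat.le_of_succ_le_succ hl
      obtain ⟨tok, r⟩ := p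
      by_cases hr : r = role
      · have hb1 : (r == role) = true := by simp [hr]
        have hb2 : (r != role) = false := by simp [hr]
        constructor
        · -- empty curr, role token: start a run with [tok]
          have hb := (ih rest hrest).2 tok []
          simp only [List.nil_append] at hb
          rw [goA]
          simp only [hb1, hb2, if_true, Bool.false_and]
          rw [if_neg (by simp), hb, find_role_alt_go, if_pos hb1]
        · intro t ts
          have hb := (ih rest hrest).2 t (ts ++ [tok])
          rw [goA]
          simp only [hb1, hb2, if_true, Bool.false_and]
          rw [if_neg (by simp), join_snoc t tok ts, hb]
          simp only [List.takeWhile_cons, List.dropWhile_cons, hb1, if_true, List.map,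
            List.append_assoc, List.cons_append, List.nil_append]
      · have hb1 : (r == role) = false := by simp [hr]
        have hb2 : (r != role) = true := by simp [hr]
        constructor
        · rw [goA]
          simp only [hb1, hb2, Bool.true_and, Bool.false_eq_true, if_false]
          rw [if_neg (by simp), (ih rest hrest).1, find_role_alt_go,
            if_neg (by simp [hr])]
        · intro t ts
          rw [goA]
          simp only [hb1, hb2, Bool.true_and, Bool.false_eq_true, if_false]
          rw [if_pos (by simp [join_cons_ne_empty t ts]), (ih rest hrest).1,
            strip_join_cons]
          simp only [List.takeWhile_cons, List.dropWhile_cons, hb1, Bool.false_eq_true,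
            if_false, List.map_nil, List.append_nil]
          rw [find_role_alt_go, if_neg (by simp [hr])]

-- A's foldl + final flush equals goA run from the same state
theorem foldl_goA (role : String) :
    ∀ (l : List (String × String)) (st : List String × String),
      (let st' := l.foldl (find_role_step role) st;
       if st'.2 != "" then st'.1 ++ [PySem.Str.strip st'.2] else st'.1)
        = st.1 ++ goA role l st.2 := by
  intro l
  induction l with
  | nil =>
    intro st
    rw [goA]
    split <;> simp_all
  | cons p rest ih =>
    intro st
    simp only [List.foldl_cons]
    rw [ih (find_role_step role st p), goA]
    unfold find_role_step
    by_cases hc :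
        (p.2 != role && ((if p.2 == role then PySem.Str.join " " [st.2, p.1] else st.2) != "")) = true
    · rw [if_pos hc, if_pos hc]
      simp [List.append_assoc]
    · rw [if_neg hc, if_neg hc]

-- ===== VERDICT (by name: the statement is the Claim_ definition above) =====
theorem find_role_spec : Claim_equal_find_role := by
  intro split tags role _
  unfold Spec_find_role find_role find_role_alt
  rw [foldl_goA role (split.zip tags) ([], "")]
  rw [(goA_eq role (split.zip tags).length (split.zip tags) le_rfl).1]
  simp
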